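-- pv_equiv track=rewrite | github.com/AxelBjork/advent_of_code | 2025/solve_day_12.py | transform_shape
-- ===== SOURCE A (Python) =====
-- def transform_shape(coords, method):
--     # Methods: 0-3 rot90, 4-7 flip+rot90
--     # method < 4: rotate 90 * method
--     # method >= 4: flip then rotate
--
--     # 0: 0 deg
--     # 1: 90 deg
--     # 2: 180 deg
--     # 3: 270 deg
--     # 4: flip H
--     # 5: flip H + 90
--     # ...
--
--     curr = list(coords)
--
--     # Flip
--     if method >= 4:
--         # Flip horizontal (around y-axis, invert c)
--         # But we need to re-normalize later, so just negate c
--         curr = [(r, -c) for r, c in curr]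
--
--     rotations = method % 4
--     for _ in range(rotations):
--         # Rotate 90 deg clockwise: (r, c) -> (c, -r)
--         curr = [(c, -r) for r, c in curr]
--
--     # Normalize to bounding box at 0,0
--     if not curr:
--         return set()
--
--     min_r = min(r for r, c in curr)
--     min_c = min(c for r, c in curr)
--
--     final_set = set()
--     for r, c in curr:
--         final_set.add((r - min_r, c - min_c))
--
--     return final_set
-- ===== SOURCE B (Python) =====
-- def transform_shape(coords, method):
--     # Closed-form transform per method instead of conditional flip + rotation loop.
--     if not coords:
--         return set()
--     k = method % 4
--     if method >= 4:
--         f = [lambda r, c: (r, -c),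
--              lambda r, c: (-c, -r),
--              lambda r, c: (-r, c),
--              lambda r, c: (c, r)][k]
--     else:
--         f = [lambda r, c: (r, c),
--              lambda r, c: (c, -r),
--              lambda r, c: (-r, -c),
--              lambda r, c: (-c, r)][k]
--     ts = [f(r, c) for r, c in coords]
--     min_r = min(r for r, _ in ts)
--     min_c = min(c for _, c in ts)
--     return {(r - min_r, c - min_c) for r, c in ts}
-- ===== Notes on version B (the rewrite author's own statement) =====
-- stated objective: simpler
-- what changed: Replaces the conditional flip pass plus the iterated 90-degree rotation loop (up to three extra map passes over the list) with one closed-form coordinate transform selected by method, applied in a single pass before normalization.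
import Mathlib
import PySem

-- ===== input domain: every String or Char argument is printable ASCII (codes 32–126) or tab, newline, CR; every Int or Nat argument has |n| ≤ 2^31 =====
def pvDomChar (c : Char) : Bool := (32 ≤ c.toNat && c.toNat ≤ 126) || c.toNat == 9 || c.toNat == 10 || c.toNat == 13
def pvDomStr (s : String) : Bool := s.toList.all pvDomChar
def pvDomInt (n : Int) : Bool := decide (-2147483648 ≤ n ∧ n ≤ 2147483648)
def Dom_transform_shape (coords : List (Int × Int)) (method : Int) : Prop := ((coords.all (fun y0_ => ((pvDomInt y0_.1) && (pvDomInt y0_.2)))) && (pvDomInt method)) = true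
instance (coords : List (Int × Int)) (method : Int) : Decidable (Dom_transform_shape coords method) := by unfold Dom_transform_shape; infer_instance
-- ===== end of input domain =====

-- B replaces A's conditional flip pass + iterated rotation loop by one closed-form
-- per-method transform applied in a single pass (objective: simpler).

-- ===== PORT A =====
def transform_shape (coords : List (Int × Int)) (method : Int) : List (Int × Int) :=
  let curr := coords
  -- if method >= 4: curr = [(r, -c) for r, c in curr]
  let curr := if method ≥ 4 then curr.map (fun p => (p.1, -p.2)) else curr
  let rotations := PySem.Int.mod method 4
  -- for _ in range(rotations): curr = [(c, -r) for r, c in curr]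
  let curr := (PySem.List.pyRange 0 rotations 1).foldl
    (fun acc _ => acc.map (fun p => (p.2, -p.1))) curr
  if curr = [] then []
  else
    -- min over a nonempty list: Python's min raises only on empty, guarded above
    let min_r := (PySem.List.min? (curr.map Prod.fst) (fun x => x)).getD 0
    let min_c := (PySem.List.min? (curr.map Prod.snd) (fun x => x)).getD 0
    curr.foldl (fun s p => PySem.Set.add s (p.1 - min_r, p.2 - min_c)) PySem.Set.empty

-- ===== PORT B =====
def transform_shape_alt (coords : List (Int × Int)) (method : Int) : List (Int × Int) :=
  if coords = [] then []
  else
    let k := PySem.Int.mod method 4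
    let f : Int × Int → Int × Int :=
      if method ≥ 4 then
        if k = 0 then fun p => (p.1, -p.2)
        else if k = 1 then fun p => (-p.2, -p.1)
        else if k = 2 then fun p => (-p.1, p.2)
        else fun p => (p.2, p.1)
      else
        if k = 0 then fun p => (p.1, p.2)
        else if k = 1 then fun p => (p.2, -p.1)
        else if k = 2 then fun p => (-p.1, -p.2)
        else fun p => (-p.2, p.1)
    let ts := coords.map f
    let min_r := (PySem.List.min? (ts.map Prod.fst) (fun x => x)).getD 0
    let min_c := (PySem.List.min? (ts.map Prod.snd) (fun x => x)).getD 0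
    PySem.Set.ofList (ts.map (fun p => (p.1 - min_r, p.2 - min_c)))

-- ===== PRECONDITION & SPEC =====
def Spec_transform_shape (coords : List (Int × Int)) (method : Int) (out : List (Int × Int)) : Prop := out = transform_shape_alt coords method
instance (coords : List (Int × Int)) (method : Int) (out : List (Int × Int)) : Decidable (Spec_transform_shape coords method out) := by unfold Spec_transform_shape; infer_instance

-- ===== CLAIM (what is proved, stated in full; the proofs are below) =====
def Claim_equal_transform_shape : Prop := ∀ (coords : List (Int × Int)) (method : Int), Dom_transform_shape coords method → Spec_transform_shape coords method (transform_shape coords method)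

-- ===== LEMMAS AND PROOFS =====

-- A's flip-then-loop list equals B's single closed-form pass.
lemma curr_eq_ts (coords : List (Int × Int)) (method : Int) :
    (PySem.List.pyRange 0 (PySem.Int.mod method 4) 1).foldl
      (fun acc _ => acc.map (fun p : Int × Int => (p.2, -p.1)))
      (if method ≥ 4 then coords.map (fun p : Int × Int => (p.1, -p.2)) else coords)
    = coords.map
      (if method ≥ 4 then
        if PySem.Int.mod method 4 = 0 then fun p : Int × Int => (p.1, -p.2)
        else if PySem.Int.mod method 4 = 1 then fun p => (-p.2, -p.1)
        else if PySem.Int.mod method 4 = 2 then fun p => (-p.1, p.2)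
        else fun p => (p.2, p.1)
      else
        if PySem.Int.mod method 4 = 0 then fun p : Int × Int => (p.1, p.2)
        else if PySem.Int.mod method 4 = 1 then fun p => (p.2, -p.1)
        else if PySem.Int.mod method 4 = 2 then fun p => (-p.1, -p.2)
        else fun p => (-p.2, p.1)) := by
  have hm : PySem.Int.mod method 4 = method % 4 :=
    PySem.Int.mod_eq_emod_of_pos (by norm_num)
  have h0 : 0 ≤ method % 4 := Int.emod_nonneg method (by norm_num)
  have h4 : method % 4 < 4 := Int.emod_lt_of_pos method (by norm_num)
  interval_cases h : method % 4 <;>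
    simp only [hm] <;>
    split_ifs <;>
    first
      | omega
      | simp [PySem.List.pyRange_one, List.range_succ, List.map_map, Function.comp, neg_neg]

-- ===== VERDICT (by name: the statement is the Claim_ definition above) =====
theorem transform_shape_spec : Claim_equal_transform_shape := by
  intro coords method _
  show transform_shape coords method = transform_shape_alt coords method
  unfold transform_shape transform_shape_alt
  simp only [curr_eq_ts coords method]
  by_cases hc : coords = []
  · simp [hc]
  · simp [hc, PySem.Set.ofList_eq_foldl, PySem.Set.empty, List.foldl_map]
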